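-- pv_equiv track=rewrite | github.com/akrherz/iem | scripts/lib/synop.py | lookup_skyl
-- ===== SOURCE A (Python) =====
-- def lookup_skyl( val ):
--     """
--     Convert the val in meters to its lookup value
--     """
-- #0 -- 0 to 50 m
-- #1 -- 50 to 100 m
-- #2 -- 100 to 200 m
-- #3 -- 200 to 300 m
-- #4 -- 300 to 600 m
-- #5 -- 600 to 1000 m
-- #6 -- 1000 to 1500 m
-- #7 -- 1500 to 2000 m
-- #8 -- 2000 to 2500 m
-- #9 -- above 2500 m
-- #/ -- unknown
--     bins = [50,100,200,300,600,1000,1500,2000,2500,1000000]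
--     cnt = 0
--     for bin in bins:
--         if val < bin:
--             return str(cnt)
--         cnt += 1
--     return "/"
-- ===== SOURCE B (Python) =====
-- import bisect
--
-- _BINS = [50, 100, 200, 300, 600, 1000, 1500, 2000, 2500, 1000000]
--
-- def lookup_skyl(val):
--     """Convert the val in meters to its lookup value (binary search over thresholds)."""
--     idx = bisect.bisect_right(_BINS, val)
--     return str(idx) if idx < 10 else "/"
-- ===== Notes on version B (the rewrite author's own statement) =====
-- stated objective: idiomatic
-- what changed: Replaces the explicit linear scan with a counter by a binary search (bisect.bisect_right) over the same sorted threshold list; bisect_right's placement of equal keys reproduces the strict 'val < bin' test exactly.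
import Mathlib
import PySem

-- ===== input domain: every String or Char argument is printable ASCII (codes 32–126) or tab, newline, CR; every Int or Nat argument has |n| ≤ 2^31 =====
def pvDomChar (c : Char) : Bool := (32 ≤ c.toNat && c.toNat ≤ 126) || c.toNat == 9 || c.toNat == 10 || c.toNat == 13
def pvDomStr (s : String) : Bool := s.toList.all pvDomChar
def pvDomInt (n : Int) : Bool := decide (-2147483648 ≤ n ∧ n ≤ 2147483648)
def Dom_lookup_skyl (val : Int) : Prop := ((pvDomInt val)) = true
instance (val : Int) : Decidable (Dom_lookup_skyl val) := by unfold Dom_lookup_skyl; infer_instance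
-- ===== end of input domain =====

-- B replaces A's linear scan over the threshold list by a binary search (bisect_right) over the same list (idiomatic).
-- ===== PORT A =====
def lookupSkylLoop (val : Int) : List Int → Int → String
  | [], _ => "/"
  | b :: rest, cnt => if val < b then PySem.Int.toStr cnt else lookupSkylLoop val rest (cnt + 1)

def lookup_skyl (val : Int) : String :=
  lookupSkylLoop val [50, 100, 200, 300, 600, 1000, 1500, 2000, 2500, 1000000] 0

-- ===== PORT B =====
def pvBins : List Int := [50, 100, 200, 300, 600, 1000, 1500, 2000, 2500, 1000000]

-- bisect.bisect_right's while-loop, fueled by hi - lo (here called with fuel 10)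
def pvBisectRight (val : Int) : Nat → Nat → Nat → Nat
  | 0, lo, _ => lo
  | fuel + 1, lo, hi =>
    if lo < hi then
      let mid := (lo + hi) / 2
      if val < pvBins.getD mid 0 then pvBisectRight val fuel lo mid
      else pvBisectRight val fuel (mid + 1) hi
    else lo

def lookup_skyl_alt (val : Int) : String :=
  let idx := pvBisectRight val 10 0 10
  if idx < 10 then PySem.Int.toStr (idx : Int) else "/"

-- ===== PRECONDITION & SPEC =====
def Spec_lookup_skyl (val : Int) (out : String) : Prop := out = lookup_skyl_alt val
instance (val : Int) (out : String) : Decidable (Spec_lookup_skyl val out) := by unfold Spec_lookup_skyl; infer_instance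

-- ===== CLAIM (what is proved, stated in full; the proofs are below) =====
def Claim_equal_lookup_skyl : Prop := ∀ (val : Int), Dom_lookup_skyl val → Spec_lookup_skyl val (lookup_skyl val)

-- ===== LEMMAS AND PROOFS =====

-- ===== VERDICT (by name: the statement is the Claim_ definition above) =====
theorem lookup_skyl_spec : Claim_equal_lookup_skyl := by
  intro val _
  unfold Spec_lookup_skyl
  by_cases h0 : val < 50
  · have f0 : val < 50 := by omega
    have f1 : val < 100 := by omega
    have f2 : val < 200 := by omega
    have f5 : val < 1000 := by omega
    simp [lookup_skyl, lookup_skyl_alt, lookupSkylLoop, pvBisectRight, pvBins, f0, f1, f2, f5]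
  by_cases h1 : val < 100
  · have f0 : ¬ (val < 50) := by omega
    have f1 : val < 100 := by omega
    have f2 : val < 200 := by omega
    have f5 : val < 1000 := by omega
    simp [lookup_skyl, lookup_skyl_alt, lookupSkylLoop, pvBisectRight, pvBins, f0, f1, f2, f5]
  by_cases h2 : val < 200
  · have f0 : ¬ (val < 50) := by omega
    have f1 : ¬ (val < 100) := by omega
    have f2 : val < 200 := by omega
    have f5 : val < 1000 := by omega
    simp [lookup_skyl, lookup_skyl_alt, lookupSkylLoop, pvBisectRight, pvBins, f0, f1, f2, f5]
  by_cases h3 : val < 300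
  · have f0 : ¬ (val < 50) := by omega
    have f1 : ¬ (val < 100) := by omega
    have f2 : ¬ (val < 200) := by omega
    have f3 : val < 300 := by omega
    have f4 : val < 600 := by omega
    have f5 : val < 1000 := by omega
    simp [lookup_skyl, lookup_skyl_alt, lookupSkylLoop, pvBisectRight, pvBins, f0, f1, f2, f3, f4, f5]
  by_cases h4 : val < 600
  · have f0 : ¬ (val < 50) := by omega
    have f1 : ¬ (val < 100) := by omega
    have f2 : ¬ (val < 200) := by omega
    have f3 : ¬ (val < 300) := by omega
    have f4 : val < 600 := by omega
    have f5 : val < 1000 := by omega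
    simp [lookup_skyl, lookup_skyl_alt, lookupSkylLoop, pvBisectRight, pvBins, f0, f1, f2, f3, f4, f5]
  by_cases h5 : val < 1000
  · have f0 : ¬ (val < 50) := by omega
    have f1 : ¬ (val < 100) := by omega
    have f2 : ¬ (val < 200) := by omega
    have f3 : ¬ (val < 300) := by omega
    have f4 : ¬ (val < 600) := by omega
    have f5 : val < 1000 := by omega
    simp [lookup_skyl, lookup_skyl_alt, lookupSkylLoop, pvBisectRight, pvBins, f0, f1, f2, f3, f4, f5]
  by_cases h6 : val < 1500
  · have f0 : ¬ (val < 50) := by omega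
    have f1 : ¬ (val < 100) := by omega
    have f2 : ¬ (val < 200) := by omega
    have f3 : ¬ (val < 300) := by omega
    have f4 : ¬ (val < 600) := by omega
    have f5 : ¬ (val < 1000) := by omega
    have f6 : val < 1500 := by omega
    have f7 : val < 2000 := by omega
    have f8 : val < 2500 := by omega
    simp [lookup_skyl, lookup_skyl_alt, lookupSkylLoop, pvBisectRight, pvBins, f0, f1, f2, f3, f4, f5, f6, f7, f8]
  by_cases h7 : val < 2000
  · have f0 : ¬ (val < 50) := by omega
    have f1 : ¬ (val < 100) := by omega
    have f2 : ¬ (val < 200) := by omega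
    have f3 : ¬ (val < 300) := by omega
    have f4 : ¬ (val < 600) := by omega
    have f5 : ¬ (val < 1000) := by omega
    have f6 : ¬ (val < 1500) := by omega
    have f7 : val < 2000 := by omega
    have f8 : val < 2500 := by omega
    simp [lookup_skyl, lookup_skyl_alt, lookupSkylLoop, pvBisectRight, pvBins, f0, f1, f2, f3, f4, f5, f6, f7, f8]
  by_cases h8 : val < 2500
  · have f0 : ¬ (val < 50) := by omega
    have f1 : ¬ (val < 100) := by omega
    have f2 : ¬ (val < 200) := by omega
    have f3 : ¬ (val < 300) := by omega
    have f4 : ¬ (val < 600) := by omega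
    have f5 : ¬ (val < 1000) := by omega
    have f6 : ¬ (val < 1500) := by omega
    have f7 : ¬ (val < 2000) := by omega
    have f8 : val < 2500 := by omega
    simp [lookup_skyl, lookup_skyl_alt, lookupSkylLoop, pvBisectRight, pvBins, f0, f1, f2, f3, f4, f5, f6, f7, f8]
  by_cases h9 : val < 1000000
  · have f0 : ¬ (val < 50) := by omega
    have f1 : ¬ (val < 100) := by omega
    have f2 : ¬ (val < 200) := by omega
    have f3 : ¬ (val < 300) := by omega
    have f4 : ¬ (val < 600) := by omega
    have f5 : ¬ (val < 1000) := by omega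
    have f6 : ¬ (val < 1500) := by omega
    have f7 : ¬ (val < 2000) := by omega
    have f8 : ¬ (val < 2500) := by omega
    have f9 : val < 1000000 := by omega
    simp [lookup_skyl, lookup_skyl_alt, lookupSkylLoop, pvBisectRight, pvBins, f0, f1, f2, f3, f4, f5, f6, f7, f8, f9]
  · have f0 : ¬ (val < 50) := by omega
    have f1 : ¬ (val < 100) := by omega
    have f2 : ¬ (val < 200) := by omega
    have f3 : ¬ (val < 300) := by omega
    have f4 : ¬ (val < 600) := by omega
    have f5 : ¬ (val < 1000) := by omega
    have f6 : ¬ (val < 1500) := by omega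
    have f7 : ¬ (val < 2000) := by omega
    have f8 : ¬ (val < 2500) := by omega
    have f9 : ¬ (val < 1000000) := by omega
    simp [lookup_skyl, lookup_skyl_alt, lookupSkylLoop, pvBisectRight, pvBins, f0, f1, f2, f3, f4, f5, f6, f7, f8, f9]
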